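-- pv_equiv track=rewrite | github.com/benrich37/pymatgen | src/pymatgen/io/jdftx/joutstructure.py | _get_etype_from_emin_lines
-- ===== SOURCE A (Python) =====
-- def _get_etype_from_emin_lines(emin_lines: list[str]) -> str | None:
--     """Return energy type string.
--
--     Return the type of energy from the electronic minimization data of a
--     JDFTx out file.
--
--     Args:
--         emin_lines (list[str]): A list of lines of text from a JDFTx out file containing the
--         electronic minimization data.
--
--     Returns:
--         str: The type of energy from the electronic minimization data of a JDFTx
--         out file.
--     """
--     etype = None
--     for line in emin_lines:
--         if "F:" in line:
--             etype = "F"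
--             break
--         if "G:" in line:
--             etype = "G"
--             break
--     # If not F or G, most likely given as Etot
--     if etype is None:
--         for line in emin_lines:
--             if "Etot:" in line:
--                 etype = "Etot"
--                 break
--     # Used as last-case scenario as the ordering of <etype> after <Iter> needs
--     # to be checked by reading through the source code (TODO)
--     if etype is None:
--         for line in emin_lines:
--             if "Iter:" in line:
--                 # Assume line will have etype in "... Iter: n <etype>: num ..."
--                 etype = line.split("Iter:")[1].split(":")[0].strip().split()[-1].strip()
--     return etype
-- ===== SOURCE B (Python) =====
-- def _get_etype_from_emin_lines(emin_lines: list[str]) -> str | None: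
--     """Single pass: return 'F'/'G' immediately; otherwise remember whether an
--     'Etot:' line was seen and the last 'Iter:' line, resolving priority at the end."""
--     etot_seen = False
--     last_iter_line = None
--     for line in emin_lines:
--         if "F:" in line:
--             return "F"
--         if "G:" in line:
--             return "G"
--         if "Etot:" in line:
--             etot_seen = True
--         elif "Iter:" in line:
--             last_iter_line = line
--     if etot_seen:
--         return "Etot"
--     if last_iter_line is not None:
--         return last_iter_line.split("Iter:")[1].split(":")[0].strip().split()[-1].strip()
--     return None
-- ===== Notes on version B (the rewrite author's own statement) =====
-- stated objective: alternative
-- what changed: A's three sequential prioritized scans (break on F:/G:, then break on Etot:, then parse every Iter: line) are fused into one single pass that returns F/G immediately, records an Etot-seen flag and the last Iter: line, and resolves the priority and the single parse after the loop.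
import Mathlib
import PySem

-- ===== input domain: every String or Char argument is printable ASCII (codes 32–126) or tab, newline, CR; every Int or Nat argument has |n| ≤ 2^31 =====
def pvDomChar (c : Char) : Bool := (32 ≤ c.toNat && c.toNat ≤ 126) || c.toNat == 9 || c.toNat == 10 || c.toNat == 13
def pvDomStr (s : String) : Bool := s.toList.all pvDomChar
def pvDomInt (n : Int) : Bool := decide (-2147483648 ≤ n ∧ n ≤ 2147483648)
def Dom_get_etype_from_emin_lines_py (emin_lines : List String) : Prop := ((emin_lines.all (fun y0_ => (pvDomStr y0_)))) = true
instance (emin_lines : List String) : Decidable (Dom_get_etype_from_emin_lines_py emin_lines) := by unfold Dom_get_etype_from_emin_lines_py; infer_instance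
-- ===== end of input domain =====

-- B replaces A's three sequential prioritized scans by one single pass with early return
-- and end-of-loop priority resolution (objective: alternative decomposition, one traversal).

-- ===== PORT A =====
-- shared helper: the parse chain line.split("Iter:")[1].split(":")[0].strip().split()[-1].strip(),
-- written identically in both Pythons; 'none' is exactly where Python raises IndexError.
def pv_parse_iter (line : String) : Option String :=
  match PySem.List.pyGet? ((PySem.Str.split? line "Iter:").getD []) 1 with
  | none => none
  | some p1 =>
    match PySem.List.pyGet? ((PySem.Str.split? p1 ":").getD []) 0 with
    | none => none
    | some p2 =>
      match PySem.List.pyGet? (PySem.Str.split₀ (PySem.Str.strip p2)) (-1) with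
      | none => none
      | some w => some (PySem.Str.strip w)

-- first loop: break on "F:" / "G:"
def pvA_fg : List String → Option String
  | [] => none
  | line :: rest =>
    if PySem.Str.isIn "F:" line then some "F"
    else if PySem.Str.isIn "G:" line then some "G"
    else pvA_fg rest

-- second loop: break on "Etot:"
def pvA_etot : List String → Option String
  | [] => none
  | line :: rest => if PySem.Str.isIn "Etot:" line then some "Etot" else pvA_etot rest

-- third loop: no break, overwrite etype on every "Iter:" line
-- (a failing parse is an IndexError in Python — those inputs are outside Pre_; here it leaves etype unchanged)
def pvA_iter : List String → Option String → Option String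
  | [], etype => etype
  | line :: rest, etype =>
    if PySem.Str.isIn "Iter:" line then
      pvA_iter rest (match pv_parse_iter line with | some s => some s | none => etype)
    else pvA_iter rest etype

def get_etype_from_emin_lines_py (emin_lines : List String) : Option String :=
  match pvA_fg emin_lines with
  | some e => some e
  | none =>
    match pvA_etot emin_lines with
    | some e => some e
    | none => pvA_iter emin_lines none

-- ===== PORT B =====
-- single pass: return "F"/"G" at once, remember Etot-seen and the last "Iter:" line,
-- resolve the priority after the loop (parse failure = Python IndexError, outside Pre_).
def pvB_loop : List String → Bool → Option String → Option String
  | [], etot_seen, last_iter_line =>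
    if etot_seen then some "Etot"
    else
      match last_iter_line with
      | some line => pv_parse_iter line
      | none => none
  | line :: rest, etot_seen, last_iter_line =>
    if PySem.Str.isIn "F:" line then some "F"
    else if PySem.Str.isIn "G:" line then some "G"
    else if PySem.Str.isIn "Etot:" line then pvB_loop rest true last_iter_line
    else if PySem.Str.isIn "Iter:" line then pvB_loop rest etot_seen (some line)
    else pvB_loop rest etot_seen last_iter_line

def get_etype_from_emin_lines_py_alt (emin_lines : List String) : Option String :=
  pvB_loop emin_lines false none

-- ===== PRECONDITION & SPEC =====
-- the "Iter:" parse chain of a line yields at least one word (otherwise Python raises IndexError)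
def pvIterParseOk (l : String) : Bool :=
  decide (2 ≤ ((PySem.Str.split? l "Iter:").getD []).length) &&
  decide (((PySem.Str.split? (((PySem.Str.split? l "Iter:").getD []).getD 1 "") ":").getD []) ≠ []) &&
  decide (PySem.Str.split₀ (PySem.Str.strip ((((PySem.Str.split? (((PySem.Str.split? l "Iter:").getD []).getD 1 "") ":").getD []).getD 0 ""))) ≠ [])

-- Pre_ excludes exactly the inputs on which A raises IndexError: no line contains
-- "F:"/"G:"/"Etot:" and some "Iter:" line's parse chain ends in an empty word list.
def Pre_get_etype_from_emin_lines_py (emin_lines : List String) : Prop :=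
  (∃ l ∈ emin_lines, PySem.Str.isIn "F:" l = true ∨ PySem.Str.isIn "G:" l = true ∨ PySem.Str.isIn "Etot:" l = true) ∨
  (∀ l ∈ emin_lines, PySem.Str.isIn "Iter:" l = true → pvIterParseOk l = true)
instance (emin_lines : List String) : Decidable (Pre_get_etype_from_emin_lines_py emin_lines) := by
  unfold Pre_get_etype_from_emin_lines_py; infer_instance

def pvWitness_get_etype_from_emin_lines_py : List String := ["Iter: 3 Etot: -5"]

def Spec_get_etype_from_emin_lines_py (emin_lines : List String) (out : Option String) : Prop := out = get_etype_from_emin_lines_py_alt emin_lines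
instance (emin_lines : List String) (out : Option String) : Decidable (Spec_get_etype_from_emin_lines_py emin_lines out) := by unfold Spec_get_etype_from_emin_lines_py; infer_instance

-- ===== CLAIM (what is proved, stated in full; the proofs are below) =====
def Claim_equal_get_etype_from_emin_lines_py : Prop := ∀ (emin_lines : List String), Dom_get_etype_from_emin_lines_py emin_lines → Pre_get_etype_from_emin_lines_py emin_lines → Spec_get_etype_from_emin_lines_py emin_lines (get_etype_from_emin_lines_py emin_lines)

-- ===== LEMMAS AND PROOFS =====

-- the last "Iter:" line recorded by B's loop, as a fold (proof-only helper)
def pvLastRec : List String → Option String → Option String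
  | [], last => last
  | l :: rest, last =>
    if PySem.Str.isIn "Etot:" l then pvLastRec rest last
    else if PySem.Str.isIn "Iter:" l then pvLastRec rest (some l)
    else pvLastRec rest last

theorem pvB_char (lines : List String) : ∀ (etot : Bool) (last : Option String),
    pvB_loop lines etot last =
      match pvA_fg lines with
      | some e => some e
      | none =>
        if etot || lines.any (fun l => PySem.Str.isIn "Etot:" l) then some "Etot"
        else
          match pvLastRec lines last with
          | some l => pv_parse_iter l
          | none => none := by
  induction lines with
  | nil => intro etot last; cases etot <;> cases last <;> simp [pvB_loop, pvA_fg, pvLastRec]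
  | cons l rest ih =>
    intro etot last
    simp only [pvB_loop, pvA_fg, pvLastRec, List.any_cons]
    by_cases hF : PySem.Str.isIn "F:" l = true
    · rw [if_pos hF, if_pos hF]
    · rw [if_neg hF, if_neg hF]
      by_cases hG : PySem.Str.isIn "G:" l = true
      · rw [if_pos hG, if_pos hG]
      · rw [if_neg hG, if_neg hG]
        by_cases hE : PySem.Str.isIn "Etot:" l = true
        · rw [if_pos hE, ih true last, hE]
          cases pvA_fg rest <;> simp
        · have hE' : PySem.Str.isIn "Etot:" l = false := by
            cases h : PySem.Str.isIn "Etot:" l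
            · rfl
            · exact absurd h hE
          by_cases hI : PySem.Str.isIn "Iter:" l = true
          · rw [if_neg hE, if_neg hE, if_pos hI, if_pos hI, ih etot (some l), hE']
            cases pvA_fg rest <;> simp
          · rw [if_neg hE, if_neg hE, if_neg hI, if_neg hI, ih etot last, hE']
            cases pvA_fg rest <;> simp

theorem pvA_etot_char (lines : List String) :
    pvA_etot lines = if lines.any (fun l => PySem.Str.isIn "Etot:" l) then some "Etot" else none := by
  induction lines with
  | nil => simp [pvA_etot]
  | cons l rest ih =>
    simp only [pvA_etot, List.any_cons]
    by_cases h : PySem.Str.isIn "Etot:" l = true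
    · rw [if_pos h]
      simp only [h, Bool.true_or]
      simp
    · have h' : PySem.Str.isIn "Etot:" l = false := by
        cases hh : PySem.Str.isIn "Etot:" l
        · rfl
        · exact absurd hh h
      rw [if_neg h, ih]
      simp only [h', Bool.false_or]

theorem pvA_fg_none {lines : List String} (h : pvA_fg lines = none) :
    ∀ l ∈ lines, PySem.Str.isIn "F:" l = false ∧ PySem.Str.isIn "G:" l = false := by
  induction lines with
  | nil => simp
  | cons l rest ih =>
    simp only [pvA_fg] at h
    split_ifs at h with hF hG
    intro x hx
    rcases List.mem_cons.mp hx with rfl | hx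
    · constructor
      · cases hh : PySem.Str.isIn "F:" x
        · rfl
        · exact absurd hh hF
      · cases hh : PySem.Str.isIn "G:" x
        · rfl
        · exact absurd hh hG
    · exact ih h x hx

theorem pvGet_nat {α : Type} (xs : List α) (n : Nat) (d : α) (h : n < xs.length) :
    PySem.List.pyGet? xs (n : Int) = some (xs.getD n d) := by
  rw [PySem.List.pyGet?_natCast xs n, List.getD_eq_getElem?_getD, List.getElem?_eq_getElem h]
  rfl

theorem pvLastRec_isSome (rest : List String) (l : String) :
    (pvLastRec rest (some l)).isSome = true := by
  induction rest generalizing l with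
  | nil => rfl
  | cons x t ih =>
    simp only [pvLastRec]
    by_cases hE : PySem.Str.isIn "Etot:" x = true
    · rw [if_pos hE]; exact ih l
    · rw [if_neg hE]
      by_cases hI : PySem.Str.isIn "Iter:" x = true
      · rw [if_pos hI]; exact ih x
      · rw [if_neg hI]; exact ih l

theorem pv_parse_ok {l : String} (h : pvIterParseOk l = true) : (pv_parse_iter l).isSome = true := by
  unfold pvIterParseOk at h
  simp only [Bool.and_eq_true, decide_eq_true_eq] at h
  obtain ⟨⟨h1, h2⟩, h3⟩ := h
  have e1 := pvGet_nat ((PySem.Str.split? l "Iter:").getD []) 1 "" (by omega)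
  simp only [Nat.cast_one] at e1
  have hlen2 : 0 < ((PySem.Str.split? (((PySem.Str.split? l "Iter:").getD []).getD 1 "") ":").getD []).length :=
    List.length_pos_iff.mpr h2
  have e2 := pvGet_nat
    ((PySem.Str.split? (((PySem.Str.split? l "Iter:").getD []).getD 1 "") ":").getD []) 0 "" hlen2
  simp only [Nat.cast_zero] at e2
  have hwpos : 0 < (PySem.Str.split₀ (PySem.Str.strip
      ((((PySem.Str.split? (((PySem.Str.split? l "Iter:").getD []).getD 1 "") ":").getD []).getD 0 "")))).length :=
    List.length_pos_iff.mpr h3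
  have e3 : ∃ w, PySem.List.pyGet? (PySem.Str.split₀ (PySem.Str.strip
      ((((PySem.Str.split? (((PySem.Str.split? l "Iter:").getD []).getD 1 "") ":").getD []).getD 0 "")))) (-1)
      = some w := by
    unfold PySem.List.pyGet? PySem.List.pyIdx?
    rw [if_neg (by omega), if_pos (by omega)]
    simp only [Option.bind]
    have ht : (-(-1 : Int)).toNat = 1 := rfl
    rw [ht]
    exact ⟨_, List.getElem?_eq_getElem (by omega)⟩
  obtain ⟨w, hw⟩ := e3
  simp only [pv_parse_iter, e1, e2, hw]
  rfl

theorem pvA_iter_char (lines : List String) : ∀ (last acc : Option String),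
    (∀ l ∈ lines, PySem.Str.isIn "Etot:" l = false) →
    (∀ l ∈ lines, PySem.Str.isIn "Iter:" l = true → (pv_parse_iter l).isSome = true) →
    (∀ l, last = some l → pv_parse_iter l = acc) →
    pvA_iter lines acc =
      match pvLastRec lines last with
      | some l => pv_parse_iter l
      | none => acc := by
  induction lines with
  | nil =>
    intro last acc _ _ hacc
    cases last with
    | none => rfl
    | some l => exact (hacc l rfl).symm
  | cons l rest ih =>
    intro last acc hE hI hacc
    have hEl : PySem.Str.isIn "Etot:" l = false := hE l (by simp)
    have hEneg : ¬ (PySem.Str.isIn "Etot:" l = true) := by rw [hEl]; decide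
    simp only [pvA_iter, pvLastRec]
    by_cases hIl : PySem.Str.isIn "Iter:" l = true
    · obtain ⟨s, hs⟩ := Option.isSome_iff_exists.mp (hI l (by simp) hIl)
      rw [if_pos hIl, if_neg hEneg, if_pos hIl, hs]
      show pvA_iter rest (some s) = _
      rw [ih (some l) (some s) (fun x hx => hE x (by simp [hx]))
        (fun x hx hx' => hI x (by simp [hx]) hx')
        (fun x hx => by injection hx with hh; rw [← hh]; exact hs)]
      cases hlr : pvLastRec rest (some l) with
      | none =>
        have hsome := pvLastRec_isSome rest l
        rw [hlr] at hsome
        exact absurd hsome (by decide)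
      | some y => rfl
    · rw [if_neg hIl, if_neg hEneg, if_neg hIl]
      exact ih last acc (fun x hx => hE x (by simp [hx]))
        (fun x hx hx' => hI x (by simp [hx]) hx') hacc

-- ===== VERDICT (by name: the statement is the Claim_ definition above) =====
theorem get_etype_from_emin_lines_py_spec : Claim_equal_get_etype_from_emin_lines_py := by
  intro lines _hDom hPre
  unfold Spec_get_etype_from_emin_lines_py get_etype_from_emin_lines_py get_etype_from_emin_lines_py_alt
  rw [pvB_char lines false none]
  cases hFG : pvA_fg lines with
  | some e => rfl
  | none =>
    rw [pvA_etot_char]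
    cases hany : lines.any (fun l => PySem.Str.isIn "Etot:" l) with
    | true => simp
    | false =>
      have hE : ∀ l ∈ lines, PySem.Str.isIn "Etot:" l = false := by
        intro x hx
        have hnx := List.any_eq_false.mp hany x hx
        cases hh : PySem.Str.isIn "Etot:" x
        · rfl
        · exact absurd hh hnx
      have hI : ∀ l ∈ lines, PySem.Str.isIn "Iter:" l = true → (pv_parse_iter l).isSome = true := by
        rcases hPre with h | h
        · exfalso
          obtain ⟨x, hx, hcase⟩ := h
          rcases hcase with hXF | hXG | hXE
          · rw [(pvA_fg_none hFG x hx).1] at hXF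
            exact absurd hXF (by decide)
          · rw [(pvA_fg_none hFG x hx).2] at hXG
            exact absurd hXG (by decide)
          · rw [hE x hx] at hXE
            exact absurd hXE (by decide)
        · intro x hx hx'
          exact pv_parse_ok (h x hx hx')
      rw [pvA_iter_char lines none none hE hI (fun x hx => by cases hx)]
      simp
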